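-- pv_equiv track=rewrite | github.com/jules-lewis/euler_help | _algebra.py | get_minimum_primes
-- ===== SOURCE A (Python) =====
-- import math
--
-- def get_non_trivial_factor_pair(x):
--     '''Returns the first factor pair of a number n that is not the
--        prime factors (1, n). If there isn't a pair (i.e. the number
--        is prime, return an empty list
--     '''
--     factors = []
--     for loop in range(2, int(math.sqrt(x))+1):
--         if x % loop == 0:
--             factors.append(loop)
--             factors.append(x // loop)
--             break
--     return factors
--
-- def get_prime_factors(x):
--     '''Returns a list containing all the prime factors of the
--        supplied number. If the number is prime, it is returned as a
--        single item list.
--     '''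
--     factors = get_non_trivial_factor_pair(x)
--     if len(factors) != 0:
--         return get_prime_factors(factors[0]) + get_prime_factors(factors[1])
--     else:
--         return [x]
--
-- def get_minimum_primes(seedlist):
--     '''Returns a sorted list containing the minimum prime numbers
--        that can be used to produce each number in the supplied list.
--        For instance, if you have a list containing [2, 3, 6], the
--        minimum necessary primes is [2, 3], because these can generate
--        all the supplied numbers. If more than one instance of a prime
--        is needed, e.g. to produce [2, 3, 6, 8] , where 8 needs three 2's,
--        the returned list will contain sufficient 2's.
--     '''
--     minimum_primes = []
--     for num in seedlist:
--         #ignore 1's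
--         if num > 1:
--             factors = get_prime_factors(num)
--             for factor in factors:
--                 if factor in minimum_primes:
--                     while factors.count(factor) > minimum_primes.count(factor):
--                         minimum_primes.append(factor)
--                 else:
--                     minimum_primes.append(factor)
--     return sorted(minimum_primes)
-- ===== SOURCE B (Python) =====
-- def get_minimum_primes(seedlist):
--     '''Returns a sorted list containing the minimum prime numbers
--        needed to produce each number in the supplied list (elementwise
--        max of prime multiplicities across the numbers).
--     '''
--     maxcount = {}
--     for num in seedlist:
--         if num > 1:
--             # iterative trial division: prime -> multiplicity for this num
--             local = {}
--             x = num
--             d = 2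
--             while d * d <= x:
--                 while x % d == 0:
--                     local[d] = local.get(d, 0) + 1
--                     x //= d
--                 d += 1
--             if x > 1:
--                 local[x] = local.get(x, 0) + 1
--             for p, c in local.items():
--                 if c > maxcount.get(p, 0):
--                     maxcount[p] = c
--     return sorted(p for p, c in maxcount.items() for _ in range(c))
-- ===== Notes on version B (the rewrite author's own statement) =====
-- stated objective: faster
-- what changed: Replaces A's recursive factor-pair splitting (repeated sqrt-bounded scans in a divide-and-conquer factor tree) and its list-based 'in'/count/append merge loop with a single iterative trial-division loop per number and a dict mapping each prime to the maximum multiplicity seen, expanded and sorted at the end.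
import Mathlib
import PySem

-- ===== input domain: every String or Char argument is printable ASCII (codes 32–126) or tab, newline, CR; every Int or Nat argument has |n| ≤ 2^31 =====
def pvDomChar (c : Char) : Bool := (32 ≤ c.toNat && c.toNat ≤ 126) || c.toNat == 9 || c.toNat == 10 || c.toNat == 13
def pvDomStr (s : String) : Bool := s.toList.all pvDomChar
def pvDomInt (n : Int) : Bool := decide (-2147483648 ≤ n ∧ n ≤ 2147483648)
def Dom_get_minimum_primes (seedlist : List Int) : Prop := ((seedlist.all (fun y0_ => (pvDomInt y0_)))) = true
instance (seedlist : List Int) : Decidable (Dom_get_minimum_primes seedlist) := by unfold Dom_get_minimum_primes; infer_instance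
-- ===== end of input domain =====

-- B replaces A's recursive factor-pair splitting and list count/append merging by a single
-- iterative trial-division loop per number plus a dict of per-prime maximal counts
-- (measurably faster: no repeated scans of the growing result list).


-- ===== PORT A =====

-- the 'for loop in range(2, int(math.sqrt(x))+1): … break' loop of get_non_trivial_factor_pair
def pvPairLoop (x : Int) : List Int → List Int
  | [] => []
  | d :: rest =>
    if PySem.Int.mod x d = 0 then [d, PySem.Int.floordiv x d] else pvPairLoop x rest

-- int(math.sqrt(x)) = Nat.sqrt x.toNat : exact for the arguments this program feeds it
-- (0 ≤ x ≤ 2^31, where CPython's correctly-rounded float sqrt truncates to the integer sqrt)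
def get_non_trivial_factor_pair (x : Int) : List Int :=
  pvPairLoop x (PySem.List.pyRange 2 ((Nat.sqrt x.toNat : Int) + 1) 1)

-- termination helper for get_prime_factors (cited in decreasing_by)
lemma pvPairLoop_pair {x a b : Int} {t l : List Int} (h : pvPairLoop x l = a :: b :: t) :
    a ∈ l ∧ PySem.Int.mod x a = 0 ∧ b = PySem.Int.floordiv x a ∧ t = [] := by
  induction l with
  | nil => simp [pvPairLoop] at h
  | cons d rest ih =>
    by_cases hd : PySem.Int.mod x d = 0
    · simp [pvPairLoop, hd] at h
      obtain ⟨h1, h2, h3⟩ := h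
      exact ⟨by simp [h1], by rw [← h1]; exact hd, by rw [← h1]; exact h2.symm, h3⟩
    · simp [pvPairLoop, hd] at h
      obtain ⟨h1, h2, h3⟩ := ih h
      exact ⟨List.mem_cons_of_mem _ h1, h2, h3⟩

-- termination helper for get_prime_factors (cited in decreasing_by)
lemma pvPair_lt {x a b : Int} {t : List Int} (h : get_non_trivial_factor_pair x = a :: b :: t) :
    a.toNat < x.toNat ∧ b.toNat < x.toNat := by
  unfold get_non_trivial_factor_pair at h
  obtain ⟨ha, hm, hb, -⟩ := pvPairLoop_pair h
  rw [PySem.List.mem_pyRange_one] at ha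
  have ha2 : 2 ≤ a := ha.1
  have has : a.toNat ≤ Nat.sqrt x.toNat := by omega
  have hsq : a.toNat ^ 2 ≤ x.toNat := Nat.le_sqrt'.mp has
  have h2a : 2 ≤ a.toNat := by omega
  have hax : a.toNat < x.toNat := by nlinarith
  have hx4 : 4 ≤ x.toNat := by nlinarith
  refine ⟨hax, ?_⟩
  have hbe : b = x / a := by rw [hb, PySem.Int.floordiv_eq_ediv_of_pos (by omega)]
  have hxx : x = ((x.toNat : Nat) : Int) := by omega
  have haa : a = ((a.toNat : Nat) : Int) := by omega
  have hbn : b = ((x.toNat / a.toNat : Nat) : Int) := by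
    rw [hbe, hxx, haa]; exact_mod_cast Int.ofNat_ediv_ofNat
  have : x.toNat / a.toNat < x.toNat := Nat.div_lt_self (by omega) (by omega)
  omega

def get_prime_factors (x : Int) : List Int :=
  match h : get_non_trivial_factor_pair x with
  | a :: b :: _ => get_prime_factors a ++ get_prime_factors b
  | _ => [x]
termination_by x.toNat
decreasing_by
  · exact (pvPair_lt h).1
  · exact (pvPair_lt h).2

-- the 'while factors.count(factor) > minimum_primes.count(factor): minimum_primes.append(factor)' loop
def pvTopUp (factors : List Int) (f : Int) (mp : List Int) : List Int :=
  if PySem.List.count mp f < PySem.List.count factors f then pvTopUp factors f (mp ++ [f]) else mp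
termination_by PySem.List.count factors f - PySem.List.count mp f
decreasing_by simp [PySem.List.count_eq, List.count_append] at *; omega

-- the 'for factor in factors: …' loop of get_minimum_primes
def pvInner (factors : List Int) : List Int → List Int → List Int
  | [], mp => mp
  | f :: rest, mp =>
    pvInner factors rest (if f ∈ mp then pvTopUp factors f mp else mp ++ [f])

def get_minimum_primes (seedlist : List Int) : List Int :=
  PySem.List.sorted
    (seedlist.foldl
      (fun mp num =>
        if 1 < num then pvInner (get_prime_factors num) (get_prime_factors num) mp else mp)
      [])
    (fun y => y) false

-- ===== PORT B =====

-- inner 'while x % d == 0: local[d] = local.get(d, 0) + 1; x //= d' loop of Source B;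
-- the fuel argument only makes the while loop structurally total (x.toNat is always enough:
-- each iteration at least halves x)
def pvDivOut : Nat → Int → Int → PySem.Dict Int Int → Int × PySem.Dict Int Int
  | 0, x, _, loc => (x, loc)
  | fuel + 1, x, d, loc =>
    if PySem.Int.mod x d = 0 then
      pvDivOut fuel (PySem.Int.floordiv x d) d (loc.modify d 0 (· + 1))
    else (x, loc)

-- outer 'while d * d <= x: …; d += 1' loop of Source B (fuel: num.toNat is always enough)
def pvTrial : Nat → Int → Int → PySem.Dict Int Int → Int × PySem.Dict Int Int
  | 0, x, _, loc => (x, loc)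
  | fuel + 1, x, d, loc =>
    if d * d ≤ x then
      let p := pvDivOut x.toNat x d loc
      pvTrial fuel p.1 (d + 1) p.2
    else (x, loc)

-- the per-number factorization dict 'local' of Source B (trial loop, then 'if x > 1: local[x] += 1')
def pvLocal (num : Int) : PySem.Dict Int Int :=
  let p := pvTrial num.toNat num 2 PySem.Dict.empty
  if 1 < p.1 then p.2.modify p.1 0 (· + 1) else p.2

def get_minimum_primes_alt (seedlist : List Int) : List Int :=
  let maxc := seedlist.foldl
    (fun m num =>
      if 1 < num then
        (pvLocal num).items.foldl
          (fun mm pc => if mm.getD pc.1 0 < pc.2 then mm.insert pc.1 pc.2 else mm) m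
      else m)
    PySem.Dict.empty
  PySem.List.sorted (maxc.items.flatMap (fun pc => List.replicate pc.2.toNat pc.1))
    (fun y => y) false

-- ===== PRECONDITION & SPEC =====
def Spec_get_minimum_primes (seedlist : List Int) (out : List Int) : Prop := out = get_minimum_primes_alt seedlist
instance (seedlist : List Int) (out : List Int) : Decidable (Spec_get_minimum_primes seedlist out) := by unfold Spec_get_minimum_primes; infer_instance

-- ===== CLAIM (what is proved, stated in full; the proofs are below) =====
def Claim_equal_get_minimum_primes : Prop := ∀ (seedlist : List Int), Dom_get_minimum_primes seedlist → Spec_get_minimum_primes seedlist (get_minimum_primes seedlist)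

-- ===== LEMMAS AND PROOFS =====

-- the canonical prime multiset of a number, as a list of Ints
def pfL (n : Int) : List Int := n.toNat.primeFactorsList.map (Nat.cast : Nat → Int)

-- the running elementwise maximum of prime multiplicities both programs compute
def runMax (seedlist : List Int) (q : Int) (a : Nat) : Nat :=
  seedlist.foldl (fun acc num => if 1 < num then max acc ((pfL num).count q) else acc) a

lemma pvPairLoop_nil {x : Int} {l : List Int} (h : pvPairLoop x l = []) :
    ∀ d ∈ l, PySem.Int.mod x d ≠ 0 := by
  induction l with
  | nil => simp
  | cons d rest ih =>
    by_cases hd : PySem.Int.mod x d = 0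
    · simp [pvPairLoop, hd] at h
    · simp [pvPairLoop, hd] at h
      intro e he
      rcases List.mem_cons.mp he with rfl | he'
      · exact hd
      · exact ih h e he'

lemma gpf_eq_pair {x a b : Int} {t : List Int} (h : get_non_trivial_factor_pair x = a :: b :: t) :
    get_prime_factors x = get_prime_factors a ++ get_prime_factors b := by
  rw [get_prime_factors]
  split
  · rename_i a' b' t' h'
    rw [h] at h'
    cases h'
    rfl
  · rename_i h'
    exact absurd h (h' a b t)

lemma gpf_eq_nil {x : Int} (h : get_non_trivial_factor_pair x = []) :
    get_prime_factors x = [x] := by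
  rw [get_prime_factors]
  split
  · rename_i a' b' t' h'
    rw [h] at h'; cases h'
  · rfl

lemma pvPairLoop_shape (x : Int) (l : List Int) :
    pvPairLoop x l = [] ∨ ∃ a b, pvPairLoop x l = [a, b] := by
  induction l with
  | nil => left; rfl
  | cons d rest ih =>
    by_cases hd : PySem.Int.mod x d = 0
    · right; exact ⟨d, PySem.Int.floordiv x d, by simp [pvPairLoop, hd]⟩
    · simpa [pvPairLoop, hd] using ih

-- A's recursive factor tree: elements are ≥ 2, prime, and multiply back to x
lemma gpf_spec : ∀ x : Int, 2 ≤ x →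
    (∀ p ∈ get_prime_factors x, 2 ≤ p ∧ p.toNat.Prime) ∧
    ((get_prime_factors x).map Int.toNat).prod = x.toNat := by
  suffices H : ∀ n : Nat, ∀ x : Int, x.toNat = n → 2 ≤ x →
      (∀ p ∈ get_prime_factors x, 2 ≤ p ∧ p.toNat.Prime) ∧
      ((get_prime_factors x).map Int.toNat).prod = x.toNat by
    intro x hx; exact H x.toNat x rfl hx
  intro n
  induction n using Nat.strong_induction_on with
  | _ n ih =>
  intro x hxn hx2
  rcases pvPairLoop_shape x (PySem.List.pyRange 2 ((Nat.sqrt x.toNat : Int) + 1) 1) with hnil | ⟨a, b, hpair⟩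
  · -- no non-trivial factor pair: x is prime
    have hgp : get_non_trivial_factor_pair x = [] := hnil
    rw [gpf_eq_nil hgp]
    have hprime : x.toNat.Prime := by
      rw [Nat.prime_def_le_sqrt]
      refine ⟨by omega, ?_⟩
      intro m hm2 hmsqrt hdvd
      have hmem : (m : Int) ∈ PySem.List.pyRange 2 ((Nat.sqrt x.toNat : Int) + 1) 1 := by
        rw [PySem.List.mem_pyRange_one]
        constructor
        · exact_mod_cast hm2
        · have : (m : Int) ≤ (Nat.sqrt x.toNat : Int) := by exact_mod_cast hmsqrt
          omega
      have hne := pvPairLoop_nil hnil (m : Int) hmem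
      apply hne
      rw [PySem.Int.mod_eq_zero_iff_dvd]
      have : (m : Int) ∣ ((x.toNat : Nat) : Int) := Int.natCast_dvd_natCast.mpr hdvd
      rwa [show ((x.toNat : Nat) : Int) = x by omega] at this
    refine ⟨?_, by simp⟩
    intro p hp
    simp only [List.mem_singleton] at hp
    subst hp
    exact ⟨hx2, hprime⟩
  · -- a non-trivial pair (a, b): recurse on both halves
    have hgp : get_non_trivial_factor_pair x = a :: b :: [] := hpair
    obtain ⟨hmem, hmod, hbdef, -⟩ := pvPairLoop_pair hgp
    rw [PySem.List.mem_pyRange_one] at hmem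
    have ha2 : 2 ≤ a := hmem.1
    have hasq : a.toNat ^ 2 ≤ x.toNat := Nat.le_sqrt'.mp (by omega)
    have haxsq : a * a ≤ x := by
      have h1 : (a.toNat : Int) = a := by omega
      have h2 : ((a.toNat ^ 2 : Nat) : Int) ≤ ((x.toNat : Nat) : Int) := by exact_mod_cast hasq
      push_cast at h2
      rw [h1] at h2
      have h3 : ((x.toNat : Nat) : Int) = x := by omega
      nlinarith [h2]
    have hdvd : a ∣ x := (PySem.Int.mod_eq_zero_iff_dvd x a).mp hmod
    have hbe : b = x / a := by rw [hbdef, PySem.Int.floordiv_eq_ediv_of_pos (by omega)]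
    have hb2 : 2 ≤ b := by
      rw [hbe]
      have hba : a ≤ x / a := (Int.le_ediv_iff_mul_le (by omega)).mpr haxsq
      linarith
    have hab : a * b = x := by rw [hbe]; exact Int.mul_ediv_cancel' hdvd
    have hxt : x.toNat = a.toNat * b.toNat := by
      rw [← hab]; exact Int.toNat_mul (by omega) (by omega)
    have hlt := pvPair_lt hgp
    have iha := ih a.toNat (by omega) a rfl ha2
    have ihb := ih b.toNat (by omega) b rfl hb2
    rw [gpf_eq_pair hgp]
    constructor
    · intro p hp
      rcases List.mem_append.mp hp with h' | h'
      · exact iha.1 p h'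
      · exact ihb.1 p h'
    · rw [List.map_append, List.prod_append, iha.2, ihb.2, hxt]

lemma gpf_count (x q : Int) (h : 2 ≤ x) :
    (get_prime_factors x).count q = (pfL x).count q := by
  obtain ⟨hall, hprod⟩ := gpf_spec x h
  have hperm : ((get_prime_factors x).map Int.toNat).Perm x.toNat.primeFactorsList :=
    Nat.primeFactorsList_unique hprod (fun p hp => by
      obtain ⟨a, ha, rfl⟩ := List.mem_map.mp hp
      exact (hall a ha).2)
  have hmap : ((get_prime_factors x).map Int.toNat).map (Nat.cast : Nat → Int) = get_prime_factors x := by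
    rw [List.map_map]
    conv_rhs => rw [← List.map_id (get_prime_factors x)]
    apply List.map_congr_left
    intro a ha
    have := (hall a ha).1
    simp only [Function.comp_apply, id_eq]
    omega
  rw [← hmap, pfL]
  exact (hperm.map (Nat.cast : Nat → Int)).count_eq q

lemma pvTopUp_count (factors : List Int) (f : Int) (mp : List Int) (q : Int) :
    (pvTopUp factors f mp).count q =
      if q = f then max (mp.count f) (factors.count f) else mp.count q := by
  fun_induction pvTopUp factors f mp with
  | case1 mp hlt ih =>
    simp only [PySem.List.count_eq] at hlt
    rw [ih]
    by_cases hq : q = f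
    · subst hq; simp [List.count_append]; omega
    · simp [List.count_append, hq]
      exact List.count_eq_zero.mpr (by simp only [List.mem_singleton]; exact hq)
  | case2 mp hlt =>
    simp only [PySem.List.count_eq] at hlt
    by_cases hq : q = f
    · subst hq; simp; omega
    · simp [hq]

lemma pvInner_count (factors : List Int) : ∀ (rest mp : List Int) (q : Int),
    (∀ p, rest.count p ≤ factors.count p) →
    (∀ p, rest.count p < factors.count p → 0 < mp.count p) →
    (pvInner factors rest mp).count q =
      if q ∈ rest then max (mp.count q) (factors.count q) else mp.count q := by
  intro rest
  induction rest with
  | nil => intro mp q _ _; simp [pvInner]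
  | cons f rest' ih =>
    intro mp q h1 h2
    have cntRest : ∀ p, (f :: rest').count p = rest'.count p + (if p = f then 1 else 0) := by
      intro p
      by_cases hp : p = f
      · subst hp; simp [List.count_cons]
      · simp [List.count_cons, hp]
        exact fun h => hp (Eq.symm h)
    simp only [pvInner]
    set mp' := if f ∈ mp then pvTopUp factors f mp else mp ++ [f] with hmp'
    have hcnt : ∀ p, mp'.count p =
        if p = f then (if f ∈ mp then max (mp.count f) (factors.count f) else mp.count f + 1)
        else mp.count p := by
      intro p
      by_cases hf : f ∈ mp
      · simp only [hmp', if_pos hf, pvTopUp_count]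
      · simp only [hmp', if_neg hf, List.count_append]
        by_cases hp : p = f
        · subst hp; simp [List.count_cons]
        · simp [List.count_cons, hp]
          exact fun h => hp (Eq.symm h)
    have h1' : ∀ p, rest'.count p ≤ factors.count p := by
      intro p; have := h1 p; rw [cntRest] at this; split_ifs at this <;> omega
    have h2' : ∀ p, rest'.count p < factors.count p → 0 < mp'.count p := by
      intro p hp
      rw [hcnt p]
      by_cases hpf : p = f
      · subst hpf
        rw [if_pos rfl]
        split_ifs with hf
        · have : 0 < mp.count p := List.count_pos_iff.mpr hf
          omega
        · omega
      · rw [if_neg hpf]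
        apply h2
        rw [cntRest, if_neg hpf]
        omega
    rw [ih mp' q h1' h2']
    by_cases hqf : q = f
    · subst hqf
      rw [if_pos (List.mem_cons_self)]
      by_cases hqr : q ∈ rest'
      · rw [if_pos hqr, hcnt, if_pos rfl]
        split_ifs with hf
        · omega
        · have hc0 : mp.count q = 0 := List.count_eq_zero.mpr hf
          have h1q := h1 q
          rw [cntRest, if_pos rfl] at h1q
          have hr1 : 0 < rest'.count q := List.count_pos_iff.mpr hqr
          omega
      · rw [if_neg hqr, hcnt, if_pos rfl]
        split_ifs with hf
        · rfl
        · have hc0 : mp.count q = 0 := List.count_eq_zero.mpr hf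
          have hr0 : rest'.count q = 0 := List.count_eq_zero.mpr hqr
          have hnot : ¬ ((q :: rest').count q < factors.count q) := by
            intro hlt
            have := h2 q hlt
            omega
          have hle := h1 q
          rw [cntRest, if_pos rfl] at hle hnot
          omega
    · rw [hcnt, if_neg hqf]
      have hmem : (q ∈ f :: rest') ↔ q ∈ rest' := by
        rw [List.mem_cons]
        exact or_iff_right hqf
      by_cases hqr : q ∈ rest'
      · rw [if_pos hqr, if_pos (hmem.mpr hqr)]
      · rw [if_neg hqr, if_neg (fun hh => hqr (hmem.mp hh))]

lemma afold_count (seedlist : List Int) : ∀ (mp : List Int) (q : Int),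
    ((seedlist.foldl
      (fun mp num =>
        if 1 < num then pvInner (get_prime_factors num) (get_prime_factors num) mp else mp)
      mp).count q) = runMax seedlist q (mp.count q) := by
  induction seedlist with
  | nil => intro mp q; simp [runMax]
  | cons num rest ih =>
    intro mp q
    have runMax_cons : ∀ (a : Nat), runMax (num :: rest) q a =
        runMax rest q (if 1 < num then max a ((pfL num).count q) else a) := by
      intro a; simp [runMax]
    simp only [List.foldl_cons]
    rw [runMax_cons]
    by_cases hn : 1 < num
    · rw [if_pos hn, if_pos hn, ih]
      congr 1
      rw [pvInner_count _ _ mp q (fun p => le_refl _) (fun p hp => absurd hp (lt_irrefl _))]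
      have hcc := gpf_count num q (by omega)
      by_cases hq : q ∈ get_prime_factors num
      · rw [if_pos hq, hcc]
      · rw [if_neg hq, ← hcc, List.count_eq_zero.mpr hq]
        omega
    · rw [if_neg hn, if_neg hn, ih]

lemma nodup_keys_modify (d : PySem.Dict Int Int) (k : Int) (f : Int → Int)
    (h : d.keys.Nodup) : (d.modify k 0 f).keys.Nodup := by
  rw [PySem.Dict.keys_modify]
  by_cases hc : d.contains k = true
  · rw [PySem.Dict.keys_insert_of_contains (h := hc)]; exact h
  · rw [PySem.Dict.keys_insert_of_not_contains (h := by simpa using hc)]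
    rw [List.nodup_append]
    refine ⟨h, by simp, ?_⟩
    intro a ha b hb
    simp only [List.mem_singleton] at hb
    subst hb
    intro heq
    subst heq
    exact hc ((PySem.Dict.contains_iff_mem_keys d a).mpr ha)

lemma mem_keys_modify (d : PySem.Dict Int Int) (k q : Int) (f : Int → Int) :
    q ∈ (d.modify k 0 f).keys ↔ q ∈ d.keys ∨ q = k := by
  rw [PySem.Dict.keys_modify]
  rw [PySem.Dict.mem_keys_insert]
  tauto

lemma pvDivOut_spec : ∀ (fuel : Nat) (x d : Int) (loc : PySem.Dict Int Int),
    0 < x → 2 ≤ d → x.toNat ≤ fuel →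
    ∃ k : Nat,
      0 < (pvDivOut fuel x d loc).1 ∧
      ¬ (d ∣ (pvDivOut fuel x d loc).1) ∧
      x = d ^ k * (pvDivOut fuel x d loc).1 ∧
      (∀ q, (pvDivOut fuel x d loc).2.getD q 0 =
        loc.getD q 0 + (k : Int) * (if q = d then 1 else 0)) ∧
      (∀ q, q ∈ (pvDivOut fuel x d loc).2.keys ↔ (q ∈ loc.keys ∨ (q = d ∧ 0 < k))) ∧
      (loc.keys.Nodup → (pvDivOut fuel x d loc).2.keys.Nodup) := by
  intro fuel
  induction fuel with
  | zero => intro x d loc hx hd hf; omega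
  | succ fuel ih =>
    intro x d loc hx hd hf
    by_cases hm : PySem.Int.mod x d = 0
    · simp only [pvDivOut, if_pos hm]
      have hdvd : d ∣ x := (PySem.Int.mod_eq_zero_iff_dvd x d).mp hm
      have hfd : PySem.Int.floordiv x d = x / d := PySem.Int.floordiv_eq_ediv_of_pos (by omega)
      rw [hfd]
      have hxx : x = d * (x / d) := (Int.mul_ediv_cancel' hdvd).symm
      have hx'pos : 0 < x / d := by
        by_contra hcon
        push_neg at hcon
        nlinarith [hxx]
      have hlt : (x / d).toNat < x.toNat := by
        have h2 : 2 * (x / d) ≤ x := by nlinarith [hxx]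
        omega
      obtain ⟨k, h1, h2, h3, h4, h5, h6⟩ := ih (x / d) d (loc.modify d 0 (· + 1)) hx'pos hd (by omega)
      refine ⟨k + 1, h1, h2, ?_, ?_, ?_, ?_⟩
      · rw [pow_succ', mul_assoc, ← h3]
        exact hxx
      · intro q
        rw [h4 q, PySem.Dict.getD_modify]
        by_cases hq : q = d
        · subst hq; simp only [if_pos rfl]; push_cast; ring
        · rw [if_neg hq]; simp [hq]
      · intro q
        rw [h5 q, mem_keys_modify]
        constructor
        · rintro ((hql | hqd) | ⟨hqd, hk⟩)
          · exact Or.inl hql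
          · exact Or.inr ⟨hqd, by omega⟩
          · exact Or.inr ⟨hqd, by omega⟩
        · rintro (hql | ⟨hqd, -⟩)
          · exact Or.inl (Or.inl hql)
          · exact Or.inl (Or.inr hqd)
      · intro hnd
        exact h6 (nodup_keys_modify _ _ _ hnd)
    · simp only [pvDivOut, if_neg hm]
      refine ⟨0, hx, ?_, by simp, by intro q; simp, by intro q; simp, fun h => h⟩
      intro hdvd
      exact hm ((PySem.Int.mod_eq_zero_iff_dvd x d).mpr hdvd)

lemma small_factor_prime (x d : Int) (hx : 1 < x) (hd : 2 ≤ d) (hlt : x < d * d)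
    (hinv : ∀ e : Int, 2 ≤ e → e < d → ¬ e ∣ x) : x.toNat.Prime := by
  by_contra hnp
  have hmf : x.toNat.minFac.Prime := Nat.minFac_prime (by omega)
  have hsq : x.toNat.minFac ^ 2 ≤ x.toNat := Nat.minFac_sq_le_self (by omega) hnp
  have hdvd : x.toNat.minFac ∣ x.toNat := Nat.minFac_dvd _
  have hm2 : 2 ≤ x.toNat.minFac := hmf.two_le
  have hxc : ((x.toNat : Nat) : Int) = x := by omega
  have hcast : ((x.toNat.minFac : Nat) : Int) * ((x.toNat.minFac : Nat) : Int) ≤ x := by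
    have h' : ((x.toNat.minFac : Nat) : Int) ^ 2 ≤ x := by
      rw [← hxc]; exact_mod_cast hsq
    nlinarith [h']
  have hmd : ((x.toNat.minFac : Nat) : Int) < d := by nlinarith [hcast]
  refine hinv (x.toNat.minFac : Int) (by exact_mod_cast hm2) hmd ?_
  have : ((x.toNat.minFac : Nat) : Int) ∣ ((x.toNat : Nat) : Int) := Int.natCast_dvd_natCast.mpr hdvd
  rwa [show ((x.toNat : Nat) : Int) = x by omega] at this

-- a divisor of x recorded at stage d (no divisor of x below d exists) is prime
lemma recorded_prime (x d : Int) (hx : 0 < x) (hd : 2 ≤ d)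
    (hinv : ∀ e : Int, 2 ≤ e → e < d → ¬ e ∣ x) (hdvd : d ∣ x) : d.toNat.Prime := by
  have hmf : d.toNat.minFac.Prime := Nat.minFac_prime (by omega)
  have hmd : d.toNat.minFac ∣ d.toNat := Nat.minFac_dvd _
  have hle : d.toNat.minFac ≤ d.toNat := Nat.minFac_le (by omega)
  rcases lt_or_eq_of_le hle with hlt | heq
  · exfalso
    have hdd : ((d.toNat.minFac : Nat) : Int) ∣ d := by
      have : ((d.toNat.minFac : Nat) : Int) ∣ ((d.toNat : Nat) : Int) := Int.natCast_dvd_natCast.mpr hmd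
      rwa [show ((d.toNat : Nat) : Int) = d by omega] at this
    exact hinv (d.toNat.minFac : Int) (by exact_mod_cast hmf.two_le) (by omega)
      (dvd_trans hdd hdvd)
  · rw [Nat.prime_def_minFac]
    exact ⟨by omega, heq⟩

lemma pvTrial_spec : ∀ (fuel : Nat) (x d : Int) (loc : PySem.Dict Int Int),
    0 < x → 2 ≤ d → (∀ e : Int, 2 ≤ e → e < d → ¬ e ∣ x) →
    x.toNat + 2 ≤ d.toNat + fuel →
    ∃ L : List Int,
      (∀ p ∈ L, 2 ≤ p ∧ p.toNat.Prime) ∧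
      ((L.map Int.toNat).prod * (pvTrial fuel x d loc).1.toNat = x.toNat) ∧
      (∀ q, (pvTrial fuel x d loc).2.getD q 0 = loc.getD q 0 + (L.count q : Int)) ∧
      (∀ q, q ∈ (pvTrial fuel x d loc).2.keys ↔ q ∈ loc.keys ∨ q ∈ L) ∧
      (loc.keys.Nodup → (pvTrial fuel x d loc).2.keys.Nodup) ∧
      0 < (pvTrial fuel x d loc).1 ∧
      (1 < (pvTrial fuel x d loc).1 → (pvTrial fuel x d loc).1.toNat.Prime) := by
  intro fuel
  induction fuel with
  | zero =>
    intro x d loc hx hd hinv hf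
    simp only [pvTrial]
    refine ⟨[], by simp, by simp, by intro q; simp, by intro q; simp, fun h => h, hx, ?_⟩
    intro h1x
    refine small_factor_prime x d h1x hd ?_ hinv
    have : x < d := by omega
    nlinarith [this]
  | succ fuel ih =>
    intro x d loc hx hd hinv hf
    simp only [pvTrial]
    by_cases hdd : d * d ≤ x
    · rw [if_pos hdd]
      obtain ⟨k, hp1, hnd, hxe, hgd, hkeys, hnodup⟩ := pvDivOut_spec x.toNat x d loc hx hd (le_refl _)
      have hdk1 : (1 : Int) ≤ d ^ k := one_le_pow₀ (by omega)
      have hple : (pvDivOut x.toNat x d loc).1 ≤ x := by nlinarith [hxe, hp1, hdk1]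
      have hinv' : ∀ e : Int, 2 ≤ e → e < d + 1 → ¬ e ∣ (pvDivOut x.toNat x d loc).1 := by
        intro e he hlt hdv
        by_cases hed : e = d
        · subst hed; exact hnd hdv
        · have hex : e ∣ x := by
            rw [hxe]; exact Dvd.dvd.mul_left hdv _
          exact hinv e he (by omega) hex
      have hf' : (pvDivOut x.toNat x d loc).1.toNat + 2 ≤ (d + 1).toNat + fuel := by omega
      obtain ⟨L, hL1, hL2, hL3, hL4, hL5, hL6, hL7⟩ :=
        ih (pvDivOut x.toNat x d loc).1 (d + 1) (pvDivOut x.toNat x d loc).2 hp1 (by omega) hinv' hf'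
      refine ⟨List.replicate k d ++ L, ?_, ?_, ?_, ?_, fun hnd => hL5 (hnodup hnd), hL6, hL7⟩
      · intro pp hpp
        rcases List.mem_append.mp hpp with hr | hl
        · obtain ⟨hk0, rfl⟩ := List.mem_replicate.mp hr
          have hddvd : pp ∣ x := by
            rw [hxe]
            exact Dvd.dvd.mul_right (dvd_pow_self pp hk0) _
          exact ⟨hd, recorded_prime x pp hx hd hinv hddvd⟩
        · exact hL1 pp hl
      · rw [List.map_append, List.prod_append, List.map_replicate, List.prod_replicate]
        have hxt : x.toNat = d.toNat ^ k * (pvDivOut x.toNat x d loc).1.toNat := by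
          have h2 : (d ^ k * (pvDivOut x.toNat x d loc).1).toNat
              = d.toNat ^ k * (pvDivOut x.toNat x d loc).1.toNat := by
            rw [Int.toNat_mul (by positivity) (by omega), Int.toNat_pow_of_nonneg (by omega)]
          exact (congrArg Int.toNat hxe).trans h2
        conv_rhs => rw [hxt, ← hL2]
        rw [mul_assoc]
      · intro q
        rw [hL3 q, hgd q, List.count_append, List.count_replicate]
        by_cases hq : q = d
        · subst hq; simp; push_cast; ring
        · simp only [beq_false_of_ne (fun h => hq (Eq.symm h)), if_neg hq, Bool.false_eq_true,
            if_false]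
          push_cast
          ring
      · intro q
        rw [hL4 q, hkeys q, List.mem_append, List.mem_replicate]
        have hk0 : 0 < k ↔ k ≠ 0 := by omega
        tauto
    · rw [if_neg hdd]
      refine ⟨[], by simp, by simp, by intro q; simp, by intro q; simp, fun h => h, hx, ?_⟩
      intro h1x
      exact small_factor_prime x d h1x hd (by omega) hinv

lemma pvLocal_spec (num : Int) (h : 1 < num) :
    (pvLocal num).keys.Nodup ∧ (∀ q, (pvLocal num).getD q 0 = ((pfL num).count q : Int)) := by
  obtain ⟨L, hL1, hL2, hL3, hL4, hL5, hL6, hL7⟩ :=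
    pvTrial_spec num.toNat num 2 PySem.Dict.empty (by omega) (by omega)
      (by intro e he hlt hdv; omega) (by omega)
  have hnd0 : (PySem.Dict.empty : PySem.Dict Int Int).keys.Nodup := List.nodup_nil
  have hgd0 : ∀ q : Int, (PySem.Dict.empty : PySem.Dict Int Int).getD q 0 = 0 := fun _ => rfl
  have hcast : ∀ (M : List Int), (∀ p ∈ M, 2 ≤ p) →
      (M.map Int.toNat).prod = num.toNat → (∀ p ∈ M, p.toNat.Prime) →
      ∀ q, (M.count q : Int) = ((pfL num).count q : Int) := by
    intro M hge hprod hpr q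
    have hperm : (M.map Int.toNat).Perm num.toNat.primeFactorsList :=
      Nat.primeFactorsList_unique hprod (fun p hp => by
        obtain ⟨a, ha, rfl⟩ := List.mem_map.mp hp
        exact hpr a ha)
    have hmap : (M.map Int.toNat).map (Nat.cast : Nat → Int) = M := by
      rw [List.map_map]
      conv_rhs => rw [← List.map_id M]
      apply List.map_congr_left
      intro a ha
      have := hge a ha
      simp only [Function.comp_apply, id_eq]
      omega
    rw [← hmap, pfL]
    exact congrArg (fun n : Nat => (n : Int)) ((hperm.map (Nat.cast : Nat → Int)).count_eq q)
  simp only [pvLocal]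
  by_cases h1 : 1 < (pvTrial num.toNat num 2 PySem.Dict.empty).1
  · rw [if_pos h1]
    set r := pvTrial num.toNat num 2 PySem.Dict.empty with hrdef
    have hKey := hcast (L ++ [r.1])
      (by
        intro p hp
        rcases List.mem_append.mp hp with hpl | hps
        · exact (hL1 p hpl).1
        · rw [List.mem_singleton] at hps; omega)
      (by
        rw [List.map_append, List.prod_append]
        simp only [List.map_cons, List.map_nil, List.prod_cons, List.prod_nil, mul_one]
        exact hL2)
      (by
        intro p hp
        rcases List.mem_append.mp hp with hpl | hps
        · exact (hL1 p hpl).2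
        · rw [List.mem_singleton] at hps; subst hps; exact hL7 h1)
    refine ⟨nodup_keys_modify _ _ _ (hL5 hnd0), ?_⟩
    intro q
    rw [PySem.Dict.getD_modify]
    by_cases hq : q = r.1
    · subst hq
      rw [if_pos rfl, ← hKey r.1, hL3 r.1, hgd0 r.1, List.count_append, List.count_singleton]
      simp
    · rw [if_neg hq, ← hKey q, hL3 q, hgd0 q, List.count_append]
      have : List.count q [r.1] = 0 :=
        List.count_eq_zero.mpr (by simp only [List.mem_singleton]; exact hq)
      rw [this]
      push_cast
      ring
  · rw [if_neg h1]
    have hx1 : (pvTrial num.toNat num 2 PySem.Dict.empty).1 = 1 := by omega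
    have hKey := hcast L (fun p hp => (hL1 p hp).1)
      (by rw [← hL2, hx1]; simp) (fun p hp => (hL1 p hp).2)
    refine ⟨hL5 hnd0, ?_⟩
    intro q
    rw [hL3 q, hgd0 q, ← hKey q]
    push_cast
    ring

-- one number's counts merged into the running maxima dict
lemma merge_fold (l : List (Int × Int)) : ∀ (m : PySem.Dict Int Int),
    (l.map Prod.fst).Nodup →
    (∀ q v, (q, v) ∈ l →
      (l.foldl (fun mm pc => if mm.getD pc.1 0 < pc.2 then mm.insert pc.1 pc.2 else mm) m).getD q 0
        = max (m.getD q 0) v) ∧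
    (∀ q, q ∉ l.map Prod.fst →
      (l.foldl (fun mm pc => if mm.getD pc.1 0 < pc.2 then mm.insert pc.1 pc.2 else mm) m).getD q 0
        = m.getD q 0) ∧
    (m.keys.Nodup →
      (l.foldl (fun mm pc => if mm.getD pc.1 0 < pc.2 then mm.insert pc.1 pc.2 else mm) m).keys.Nodup) := by
  induction l with
  | nil => intro m _; exact ⟨by simp, fun q _ => rfl, fun h => h⟩
  | cons pc rest ih =>
    obtain ⟨p, c⟩ := pc
    intro m hnd
    rw [List.map_cons, List.nodup_cons] at hnd
    obtain ⟨hp, hnd'⟩ := hnd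
    simp only [List.foldl_cons]
    set m1 := if m.getD (p, c).1 0 < (p, c).2 then m.insert (p, c).1 (p, c).2 else m with hm1def
    have hm1 : ∀ q, m1.getD q 0 = if q = p then max (m.getD p 0) c else m.getD q 0 := by
      intro q
      by_cases hc : m.getD (p, c).1 0 < (p, c).2
      · rw [hm1def, if_pos hc, PySem.Dict.getD_insert]
        by_cases hqp : q = p
        · rw [if_pos hqp, if_pos hqp]
          simp only at hc
          omega
        · rw [if_neg hqp, if_neg hqp]
      · rw [hm1def, if_neg hc]
        simp only at hc
        by_cases hqp : q = p
        · subst hqp; rw [if_pos rfl]; omega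
        · rw [if_neg hqp]
    have hm1k : m.keys.Nodup → m1.keys.Nodup := by
      intro h
      rw [hm1def]; split
      · exact PySem.Dict.nodup_keys_insert _ _ _ h
      · exact h
    obtain ⟨ih1, ih2, ih3⟩ := ih m1 hnd'
    refine ⟨?_, ?_, fun h => ih3 (hm1k h)⟩
    · intro q v hqv
      rcases List.mem_cons.mp hqv with heq | hmem
      · rw [Prod.mk.injEq] at heq
        obtain ⟨hq, hv⟩ := heq
        rw [ih2 q (by rw [hq]; exact hp), hm1 q, if_pos hq, hq, hv]
      · have hqmem : q ∈ rest.map Prod.fst := List.mem_map.mpr ⟨(q, v), hmem, rfl⟩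
        have hqp : q ≠ p := fun h => hp (h ▸ hqmem)
        rw [ih1 q v hmem, hm1 q, if_neg hqp]
    · intro q hq
      simp only [List.map_cons, List.mem_cons] at hq
      push_neg at hq
      rw [ih2 q hq.2, hm1 q, if_neg hq.1]

lemma merge_spec (loc m : PySem.Dict Int Int) (hnl : loc.keys.Nodup)
    (hm : ∀ q, 0 ≤ m.getD q 0) :
    (∀ q, (loc.items.foldl
        (fun mm pc => if mm.getD pc.1 0 < pc.2 then mm.insert pc.1 pc.2 else mm) m).getD q 0
      = max (m.getD q 0) (loc.getD q 0)) ∧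
    (m.keys.Nodup → (loc.items.foldl
        (fun mm pc => if mm.getD pc.1 0 < pc.2 then mm.insert pc.1 pc.2 else mm) m).keys.Nodup) := by
  obtain ⟨mf1, mf2, mf3⟩ := merge_fold loc.items m hnl
  refine ⟨?_, mf3⟩
  intro q
  by_cases hc : loc.contains q = true
  · have hsome : ∃ v, loc.get? q = some v := by
      have h2 := PySem.Dict.contains_eq_isSome_get? (d := loc) (k := q)
      rw [hc] at h2
      exact Option.isSome_iff_exists.mp h2.symm
    obtain ⟨v, hv⟩ := hsome
    have hmem := PySem.Dict.mem_items_of_get?_eq_some (h := hv)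
    have hgd : loc.getD q 0 = v := by rw [PySem.Dict.getD_eq_get?_getD, hv]; rfl
    rw [mf1 q v hmem, hgd]
  · have hcf : loc.contains q = false := by simpa using hc
    have hq : q ∉ loc.items.map Prod.fst := by
      intro hmm
      have hmk := (PySem.Dict.contains_iff_mem_keys loc q).mpr hmm
      rw [hcf] at hmk
      cases hmk
    rw [mf2 q hq,
      show loc.getD q 0 = 0 from PySem.Dict.getD_of_not_contains (h := hcf) (d0 := 0)]
    have := hm q
    omega

-- the Int-valued running maximum B computes
def runMaxInt (seedlist : List Int) (q : Int) (a : Int) : Int :=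
  seedlist.foldl (fun acc num => if 1 < num then max acc ((pfL num).count q : Int) else acc) a

lemma bfold_spec (seedlist : List Int) : ∀ (m : PySem.Dict Int Int),
    m.keys.Nodup → (∀ q, 0 ≤ m.getD q 0) →
    (∀ q, (seedlist.foldl
        (fun m num =>
          if 1 < num then
            (pvLocal num).items.foldl
              (fun mm pc => if mm.getD pc.1 0 < pc.2 then mm.insert pc.1 pc.2 else mm) m
          else m) m).getD q 0 = runMaxInt seedlist q (m.getD q 0)) ∧
    ((seedlist.foldl
        (fun m num =>
          if 1 < num then
            (pvLocal num).items.foldl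
              (fun mm pc => if mm.getD pc.1 0 < pc.2 then mm.insert pc.1 pc.2 else mm) m
          else m) m).keys.Nodup) := by
  induction seedlist with
  | nil => intro m hk _; exact ⟨fun _ => rfl, hk⟩
  | cons num rest ih =>
    intro m hk hnn
    simp only [List.foldl_cons]
    by_cases hn : 1 < num
    · rw [if_pos hn]
      obtain ⟨hlk, hlg⟩ := pvLocal_spec num hn
      obtain ⟨hq, hnd2⟩ := merge_spec (pvLocal num) m hlk hnn
      have hnn' : ∀ q, 0 ≤ ((pvLocal num).items.foldl
          (fun mm pc => if mm.getD pc.1 0 < pc.2 then mm.insert pc.1 pc.2 else mm) m).getD q 0 := by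
        intro q
        rw [hq q]
        have := hnn q
        omega
      obtain ⟨ih1, ih2⟩ := ih _ (hnd2 hk) hnn'
      refine ⟨?_, ih2⟩
      intro q
      rw [ih1 q, hq q, hlg q]
      simp only [runMaxInt, List.foldl_cons, if_pos hn]
    · rw [if_neg hn]
      obtain ⟨ih1, ih2⟩ := ih m hk hnn
      refine ⟨?_, ih2⟩
      intro q
      rw [ih1 q]
      simp only [runMaxInt, List.foldl_cons, if_neg hn]

lemma runMaxInt_cast (seedlist : List Int) (q : Int) (a : Nat) :
    runMaxInt seedlist q (a : Int) = (runMax seedlist q a : Int) := by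
  induction seedlist generalizing a with
  | nil => rfl
  | cons num rest ih =>
    have h1 : runMaxInt (num :: rest) q (a : Int) =
        runMaxInt rest q (if 1 < num then max (a : Int) ((pfL num).count q : Int) else (a : Int)) := by
      simp [runMaxInt]
    have h2 : runMax (num :: rest) q a =
        runMax rest q (if 1 < num then max a ((pfL num).count q) else a) := by
      simp [runMax]
    rw [h1, h2]
    by_cases hn : 1 < num
    · rw [if_pos hn, if_pos hn, ← Nat.cast_max, ih]
    · rw [if_neg hn, if_neg hn, ih]

lemma expand_count_not_mem (l : List (Int × Int)) (q : Int) (h : q ∉ l.map Prod.fst) :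
    (l.flatMap (fun pc => List.replicate pc.2.toNat pc.1)).count q = 0 := by
  induction l with
  | nil => simp
  | cons pc rest ih =>
    simp only [List.map_cons, List.mem_cons] at h
    push_neg at h
    simp only [List.flatMap_cons, List.count_append, ih h.2, List.count_replicate]
    rw [beq_false_of_ne (fun hh => h.1 (Eq.symm hh))]
    simp

lemma expand_count_mem (l : List (Int × Int)) (h : (l.map Prod.fst).Nodup) (q v : Int)
    (hm : (q, v) ∈ l) :
    (l.flatMap (fun pc => List.replicate pc.2.toNat pc.1)).count q = v.toNat := by
  induction l with
  | nil => cases hm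
  | cons pc rest ih =>
    obtain ⟨p, c⟩ := pc
    rw [List.map_cons, List.nodup_cons] at h
    obtain ⟨hp, hnd⟩ := h
    rcases List.mem_cons.mp hm with heq | hmem
    · rw [Prod.mk.injEq] at heq
      obtain ⟨hq, hv⟩ := heq
      simp only [List.flatMap_cons, List.count_append]
      have h0 : (rest.flatMap (fun pc => List.replicate pc.2.toNat pc.1)).count q = 0 :=
        expand_count_not_mem rest q (by rw [hq]; exact hp)
      rw [h0, List.count_replicate, show ((p : Int) == q) = true from beq_iff_eq.mpr (Eq.symm hq),
        hv]
      simp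
    · have hqmem : q ∈ rest.map Prod.fst := List.mem_map.mpr ⟨(q, v), hmem, rfl⟩
      have hqp : q ≠ p := fun hh => hp (hh ▸ hqmem)
      simp only [List.flatMap_cons, List.count_append, List.count_replicate]
      rw [beq_false_of_ne (fun hh => hqp (Eq.symm hh))]
      simp only [Bool.false_eq_true, if_false, Nat.zero_add]
      exact ih hnd hmem

lemma expand_getD (d : PySem.Dict Int Int) (h : d.keys.Nodup) (q : Int) :
    (d.items.flatMap (fun pc => List.replicate pc.2.toNat pc.1)).count q = (d.getD q 0).toNat := by
  by_cases hc : d.contains q = true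
  · have hsome : ∃ v, d.get? q = some v := by
      have h2 := PySem.Dict.contains_eq_isSome_get? (d := d) (k := q)
      rw [hc] at h2
      exact Option.isSome_iff_exists.mp h2.symm
    obtain ⟨v, hv⟩ := hsome
    have hmem := PySem.Dict.mem_items_of_get?_eq_some (h := hv)
    have hgd : d.getD q 0 = v := by rw [PySem.Dict.getD_eq_get?_getD, hv]; rfl
    rw [expand_count_mem d.items h q v hmem, hgd]
  · have hq : q ∉ d.items.map Prod.fst := by
      intro hmm
      have := (PySem.Dict.contains_iff_mem_keys d q).mpr hmm
      exact hc this
    rw [expand_count_not_mem d.items q hq,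
      PySem.Dict.getD_of_not_contains (h := by simpa using hc) (d0 := 0)]
    rfl

-- ===== VERDICT (by name: the statement is the Claim_ definition above) =====
theorem get_minimum_primes_spec : Claim_equal_get_minimum_primes := by
  intro seedlist _
  show get_minimum_primes seedlist = get_minimum_primes_alt seedlist
  simp only [get_minimum_primes, get_minimum_primes_alt]
  apply PySem.List.sorted_eq_sorted_of_perm _ _ _ (fun a b h => h)
  apply List.perm_iff_count.mpr
  intro q
  have hA := afold_count seedlist [] q
  rw [List.count_nil] at hA
  obtain ⟨hB1, hB2⟩ := bfold_spec seedlist PySem.Dict.empty List.nodup_nil (fun _ => le_refl 0)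
  rw [hA, expand_getD _ hB2 q, hB1 q]
  have h0 : (PySem.Dict.empty : PySem.Dict Int Int).getD q 0 = ((0 : Nat) : Int) := rfl
  rw [h0, runMaxInt_cast]
  simp
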